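-- pv_equiv track=rewrite | github.com/mohammadfaiizan/ProjectI | DSA/Problem/Graph/11_Network_Flow_Min_Cut/Project_Selection_Problem.py | _find_reachable_projects
-- ===== SOURCE A (Python) =====
-- from typing import List, Dict, Set, Tuple, Optional, Union
-- from collections import defaultdict, deque
--
-- def _find_reachable_projects(graph: Dict, source: int, n: int) -> List[int]:
--     """Find projects reachable from source"""
--     reachable = set()
--     queue = deque([source])
--     reachable.add(source)
--
--     while queue:
--         current = queue.popleft()
--         for neighbor in graph[current]:
--             if neighbor not in reachable and graph[current][neighbor] > 0:
--                 reachable.add(neighbor)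
--                 queue.append(neighbor)
--
--     # Extract project IDs
--     selected_projects = []
--     for vertex in reachable:
--         if 0 <= vertex < n:  # Project vertices
--             selected_projects.append(vertex)
--
--     return selected_projects
-- ===== SOURCE B (Python) =====
-- def _find_reachable_projects(graph, source, n):
--     """Find projects reachable from source (iterative depth-first search, mark-at-pop)"""
--     reachable = set()
--     stack = [source]
--     while stack:
--         v = stack.pop()
--         if v in reachable:
--             continue
--         reachable.add(v)
--         for neighbor, capacity in graph[v].items():
--             if capacity > 0:
--                 stack.append(neighbor)
--     return sorted(v for v in reachable if 0 <= v < n)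
-- ===== Notes on version B (the rewrite author's own statement) =====
-- stated objective: alternative
-- what changed: Replaces the BFS over a FIFO deque with push-time marking by an iterative depth-first search over an explicit LIFO stack that marks vertices at pop time (the stack may hold duplicates, skipped when popped), and emits the project vertices in ascending order (the returned list is a set of vertices; A's order is Python's set-hash order).
import Mathlib
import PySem

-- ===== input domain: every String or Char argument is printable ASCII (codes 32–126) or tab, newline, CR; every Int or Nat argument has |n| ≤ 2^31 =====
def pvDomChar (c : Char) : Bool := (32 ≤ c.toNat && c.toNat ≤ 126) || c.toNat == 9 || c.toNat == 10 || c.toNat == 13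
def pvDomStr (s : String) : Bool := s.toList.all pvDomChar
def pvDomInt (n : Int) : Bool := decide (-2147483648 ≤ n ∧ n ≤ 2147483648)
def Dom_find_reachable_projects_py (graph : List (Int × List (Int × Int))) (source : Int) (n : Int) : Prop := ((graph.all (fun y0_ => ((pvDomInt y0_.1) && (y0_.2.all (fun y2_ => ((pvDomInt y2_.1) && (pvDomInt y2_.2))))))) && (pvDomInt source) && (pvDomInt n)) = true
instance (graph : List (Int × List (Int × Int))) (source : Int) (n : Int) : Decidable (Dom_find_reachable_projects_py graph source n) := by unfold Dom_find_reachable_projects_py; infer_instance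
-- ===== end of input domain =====

-- B replaces A's FIFO-queue BFS (push-time marking) by an iterative DFS over an explicit LIFO
-- stack with mark-at-pop, and emits the project vertices in ascending order (objective:
-- alternative, not faster). Python iterates the final set `reachable` in unspecified hash
-- order; that order is unmodelled and the output is compared as a set, so both ports fix the
-- ascending order (an order-insensitive consumption of the set).

-- ===== PORT A =====
-- graph[current]: first-match association-list lookup, exactly a Python dict access
-- (a missing key raises KeyError in Python; those inputs are excluded by Pre_ below).
def pvAdj (graph : List (Int × List (Int × Int))) (v : Int) : List (Int × Int) :=
  match graph with
  | [] => []
  | (k, adj) :: rest => if k == v then adj else pvAdj rest v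

-- `for neighbor in graph[current]` with the lookup `graph[current][neighbor]` is, for a
-- Python dict (unique keys), iteration over its (key, value) items.

-- all vertices that occur as a neighbor anywhere in graph (termination universe)
def pvU (graph : List (Int × List (Int × Int))) : List Int :=
  graph.flatMap (fun p => p.2.map Prod.fst)

-- number of universe occurrences not yet in the reachable set (termination measure of A's loop)
def pvC (graph : List (Int × List (Int × Int))) (r : PySem.Set Int) : Nat :=
  (pvU graph).countP (fun x => !decide (x ∈ r))

-- body of A's inner `for neighbor in graph[current]` loop; state = (reachable, queue)
def pvStepA (s : PySem.Set Int × List Int) (p : Int × Int) : PySem.Set Int × List Int :=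
  if !(PySem.Set.contains s.1 p.1) && decide (0 < p.2) then
    (PySem.Set.add s.1 p.1, s.2 ++ [p.1])
  else s

-- termination lemmas (cited by the decreasing_by of bfsLoop / dfsLoop below)
lemma pv_adj_subset_U (graph : List (Int × List (Int × Int))) (v : Int) :
    ∀ p ∈ pvAdj graph v, p.1 ∈ pvU graph := by
  induction graph with
  | nil => exact fun p hp => nomatch hp
  | cons hd tl ih =>
    obtain ⟨k, a⟩ := hd
    intro p hp
    rw [pvAdj] at hp
    rw [pvU, List.flatMap_cons]
    by_cases hk : (k == v) = true
    · rw [if_pos hk] at hp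
      exact List.mem_append_left _ (List.mem_map_of_mem hp)
    · rw [if_neg hk] at hp
      exact List.mem_append_right _ (ih p hp)

lemma pvC_add_lt (graph : List (Int × List (Int × Int))) (r : PySem.Set Int) (nb : Int)
    (hU : nb ∈ pvU graph) (hnm : nb ∉ r) :
    pvC graph (PySem.Set.add r nb) + 1 ≤ pvC graph r := by
  rw [PySem.Set.add_of_not_mem hnm]
  obtain ⟨u1, u2, hu⟩ := List.append_of_mem hU
  have m : ∀ l : List Int,
      l.countP (fun x => !decide (x ∈ r ++ [nb])) ≤ l.countP (fun x => !decide (x ∈ r)) := by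
    intro l
    refine List.countP_mono_left ?_
    intro a _ ha
    rw [Bool.not_eq_true', decide_eq_false_iff_not] at ha
    rw [Bool.not_eq_true', decide_eq_false_iff_not]
    exact fun hm => ha (List.mem_append_left _ hm)
  have e1 : (!decide (nb ∈ r ++ [nb])) = false := by
    rw [decide_eq_true (List.mem_append_right r (List.mem_singleton_self nb))]; rfl
  have e2 : (!decide (nb ∈ r)) = true := by
    rw [decide_eq_false hnm]; rfl
  rw [pvC, pvC, hu, List.countP_append, List.countP_append, List.countP_cons,
      List.countP_cons, e1, e2, if_neg Bool.false_ne_true, if_pos rfl, Nat.add_zero,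
      ← Nat.add_assoc]
  exact Nat.succ_le_succ (Nat.add_le_add (m u1) (m u2))

lemma pv_foldA_bound (graph : List (Int × List (Int × Int))) :
    ∀ (l : List (Int × Int)), (∀ p ∈ l, p.1 ∈ pvU graph) →
    ∀ (r : PySem.Set Int) (q : List Int),
      pvC graph (l.foldl pvStepA (r, q)).1 + (l.foldl pvStepA (r, q)).2.length
        ≤ pvC graph r + q.length := by
  intro l
  induction l with
  | nil => exact fun _ r q => Nat.le_refl _
  | cons p tl ih =>
    intro hmem r q
    rw [List.foldl_cons]
    by_cases hc : (!(PySem.Set.contains r p.1) && decide (0 < p.2)) = true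
    · rw [pvStepA, if_pos hc]
      have ha : PySem.Set.contains r p.1 = false := by
        have h1 := ((Bool.and_eq_true _ _).mp hc).1
        rwa [Bool.not_eq_true'] at h1
      have hnm : p.1 ∉ r :=
        fun hm => Bool.false_ne_true (ha ▸ (PySem.Set.contains_iff r p.1).2 hm)
      have hlt := pvC_add_lt graph r p.1 (hmem p (List.mem_cons_self ..)) hnm
      refine Nat.le_trans (ih (fun x hx => hmem x (List.mem_cons_of_mem p hx))
        (PySem.Set.add r p.1) (q ++ [p.1])) ?_
      rw [List.length_append, ← Nat.add_assoc, Nat.add_right_comm]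
      exact Nat.add_le_add_right hlt q.length
    · rw [pvStepA, if_neg hc]
      exact ih (fun x hx => hmem x (List.mem_cons_of_mem p hx)) r q

lemma pv_bfs_dec (graph : List (Int × List (Int × Int))) (cur : Int) (rest : List Int)
    (reach : PySem.Set Int) :
    pvC graph ((pvAdj graph cur).foldl pvStepA (reach, rest)).1 +
      ((pvAdj graph cur).foldl pvStepA (reach, rest)).2.length
      < pvC graph reach + (cur :: rest).length :=
  Nat.lt_of_le_of_lt (pv_foldA_bound graph _ (pv_adj_subset_U graph cur) reach rest)
    (Nat.add_lt_add_left (Nat.lt_succ_self rest.length) (pvC graph reach))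

-- A's while-loop over the deque
def bfsLoop (graph : List (Int × List (Int × Int))) (queue : List Int)
    (reach : PySem.Set Int) : PySem.Set Int :=
  match queue with
  | [] => reach
  | cur :: rest =>
    let st := (pvAdj graph cur).foldl pvStepA (reach, rest)
    bfsLoop graph st.2 st.1
termination_by pvC graph reach + queue.length
decreasing_by exact pv_bfs_dec graph cur rest reach

def find_reachable_projects_py (graph : List (Int × List (Int × Int))) (source : Int)
    (n : Int) : List Int :=
  let reachable : PySem.Set Int := PySem.Set.add PySem.Set.empty source
  let reachable := bfsLoop graph [source] reachable
  -- `for vertex in reachable: if 0 <= vertex < n: selected_projects.append(vertex)` iterates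
  -- the set in unmodelled hash order; the output is a set of vertices, so the iteration is
  -- fixed to ascending order (sorted without key — order-insensitive set consumption)
  (PySem.List.sorted reachable (fun x => x) false).foldl
    (fun acc v => if decide (0 ≤ v) && decide (v < n) then acc ++ [v] else acc) []

-- ===== PORT B =====
-- `for neighbor, capacity in graph[v].items(): if capacity > 0: stack.append(neighbor)`;
-- the stack is modelled with its TOP AT THE HEAD (Python appends/pops at the right end),
-- so append = cons and stack.pop() = head
def pvPush (adj : List (Int × Int)) (stk : List Int) : List Int :=
  adj.foldl (fun s p => if decide (0 < p.2) then p.1 :: s else s) stk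

-- count of the distinct not-yet-marked vertices among the universe and the stack
-- (termination measure of B's loop)
def pvD (graph : List (Int × List (Int × Int))) (reach : PySem.Set Int)
    (stk : List Int) : Nat :=
  ((pvU graph ++ stk).toFinset.filter (fun x => x ∉ reach)).card

lemma pv_push_mem (adj : List (Int × Int)) :
    ∀ (stk : List Int) (x : Int), x ∈ pvPush adj stk →
      x ∈ stk ∨ ∃ c, (x, c) ∈ adj ∧ 0 < c := by
  induction adj with
  | nil => exact fun stk x hx => Or.inl hx
  | cons p tl ih =>
    intro stk x hx
    rw [pvPush, List.foldl_cons] at hx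
    by_cases hp : (decide (0 < p.2)) = true
    · rw [if_pos hp] at hx
      rcases ih (p.1 :: stk) x hx with h | ⟨c, hc1, hc2⟩
      · rcases List.mem_cons.mp h with h | h
        · exact Or.inr ⟨p.2, by rw [h]; exact List.mem_cons_self .., of_decide_eq_true hp⟩
        · exact Or.inl h
      · exact Or.inr ⟨c, List.mem_cons_of_mem p hc1, hc2⟩
    · rw [if_neg hp] at hx
      rcases ih stk x hx with h | ⟨c, hc1, hc2⟩
      · exact Or.inl h
      · exact Or.inr ⟨c, List.mem_cons_of_mem p hc1, hc2⟩

lemma pv_push_length (adj : List (Int × Int)) :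
    ∀ (stk : List Int), (pvPush adj stk).length ≤ stk.length + adj.length := by
  induction adj with
  | nil => exact fun stk => Nat.le_refl _
  | cons p tl ih =>
    intro stk
    rw [pvPush, List.foldl_cons]
    by_cases hp : (decide (0 < p.2)) = true
    · rw [if_pos hp]
      have h := ih (p.1 :: stk)
      simp only [pvPush, List.length_cons] at h
      rw [List.length_cons]
      omega
    · rw [if_neg hp]
      have h := ih stk
      simp only [pvPush] at h
      rw [List.length_cons]
      omega

lemma pv_adj_length_le (graph : List (Int × List (Int × Int))) (v : Int) :
    (pvAdj graph v).length ≤ (pvU graph).length := by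
  induction graph with
  | nil => simp [pvAdj, pvU]
  | cons hd tl ih =>
    obtain ⟨k, a⟩ := hd
    have h := ih
    rw [pvU] at h
    rw [pvAdj]
    simp only [pvU, List.flatMap_cons, List.length_append, List.length_map]
    by_cases hk : (k == v) = true
    · rw [if_pos hk]; omega
    · rw [if_neg hk]; omega

lemma pvD_skip_le (graph : List (Int × List (Int × Int))) (reach : PySem.Set Int)
    (v : Int) (rest : List Int) :
    pvD graph reach rest ≤ pvD graph reach (v :: rest) := by
  refine Finset.card_le_card (Finset.filter_subset_filter _ ?_)
  intro x hx
  rw [List.mem_toFinset] at hx ⊢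
  rcases List.mem_append.mp hx with h | h
  · exact List.mem_append_left _ h
  · exact List.mem_append_right _ (List.mem_cons_of_mem v h)

lemma pvD_visit_lt (graph : List (Int × List (Int × Int))) (reach : PySem.Set Int)
    (v : Int) (rest : List Int) (hv : v ∉ reach) :
    pvD graph (PySem.Set.add reach v) (pvPush (pvAdj graph v) rest)
      < pvD graph reach (v :: rest) := by
  have hvS : v ∈ (pvU graph ++ v :: rest).toFinset.filter (fun x => x ∉ reach) := by
    rw [Finset.mem_filter, List.mem_toFinset]
    exact ⟨List.mem_append_right _ (List.mem_cons_self ..), hv⟩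
  refine Nat.lt_of_le_of_lt
    (Finset.card_le_card (show _ ⊆ ((pvU graph ++ v :: rest).toFinset.filter
      (fun x => x ∉ reach)).erase v from ?_))
    (Finset.card_erase_lt_of_mem hvS)
  intro x hx
  rw [Finset.mem_filter, List.mem_toFinset] at hx
  obtain ⟨hmem, hnadd⟩ := hx
  have hxr : x ∉ reach ∧ x ≠ v := by
    constructor
    · exact fun h => hnadd (by rw [PySem.Set.mem_add]; exact Or.inl h)
    · exact fun h => hnadd (by rw [PySem.Set.mem_add]; exact Or.inr h)
  rw [Finset.mem_erase, Finset.mem_filter, List.mem_toFinset]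
  refine ⟨hxr.2, ?_, hxr.1⟩
  rcases List.mem_append.mp hmem with h | h
  · exact List.mem_append_left _ h
  · rcases pv_push_mem (pvAdj graph v) rest x h with h2 | ⟨c, hc1, hc2⟩
    · exact List.mem_append_right _ (List.mem_cons_of_mem v h2)
    · exact List.mem_append_left _ (pv_adj_subset_U graph v (x, c) hc1)

lemma pv_dfs_dec_skip (graph : List (Int × List (Int × Int))) (v : Int) (rest : List Int)
    (reach : PySem.Set Int) :
    ((pvU graph).length + 1) * pvD graph reach rest + rest.length
      < ((pvU graph).length + 1) * pvD graph reach (v :: rest) + (v :: rest).length := by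
  have h1 := pvD_skip_le graph reach v rest
  have h2 := Nat.mul_le_mul_left ((pvU graph).length + 1) h1
  rw [List.length_cons]
  omega

lemma pv_dfs_dec_visit (graph : List (Int × List (Int × Int))) (v : Int) (rest : List Int)
    (reach : PySem.Set Int) (hv : v ∉ reach) :
    ((pvU graph).length + 1) * pvD graph (PySem.Set.add reach v) (pvPush (pvAdj graph v) rest)
        + (pvPush (pvAdj graph v) rest).length
      < ((pvU graph).length + 1) * pvD graph reach (v :: rest) + (v :: rest).length := by
  have h1 := pvD_visit_lt graph reach v rest hv
  have h1' : pvD graph (PySem.Set.add reach v) (pvPush (pvAdj graph v) rest) + 1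
      ≤ pvD graph reach (v :: rest) := h1
  have h2 := Nat.mul_le_mul_left ((pvU graph).length + 1) h1'
  rw [Nat.mul_add, Nat.mul_one] at h2
  have h3 := pv_push_length (pvAdj graph v) rest
  have h4 := pv_adj_length_le graph v
  rw [List.length_cons]
  omega

-- B's while-loop over the stack: pop (head), skip if already marked, else mark and push the
-- positive-capacity neighbors
def dfsLoop (graph : List (Int × List (Int × Int))) (stk : List Int)
    (reach : PySem.Set Int) : PySem.Set Int :=
  match stk with
  | [] => reach
  | v :: rest =>
    if hv : v ∈ reach then dfsLoop graph rest reach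
    else dfsLoop graph (pvPush (pvAdj graph v) rest) (PySem.Set.add reach v)
termination_by ((pvU graph).length + 1) * pvD graph reach stk + stk.length
decreasing_by
· exact pv_dfs_dec_skip graph v rest reach
· exact pv_dfs_dec_visit graph v rest reach hv

def find_reachable_projects_py_alt (graph : List (Int × List (Int × Int))) (source : Int)
    (n : Int) : List Int :=
  let reachable := dfsLoop graph [source] PySem.Set.empty
  -- sorted(v for v in reachable if 0 <= v < n): sorted without key over the filtered set
  PySem.List.sorted (reachable.filter (fun v => decide (0 ≤ v) && decide (v < n)))
    (fun x => x) false

-- ===== PRECONDITION & SPEC =====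
-- Exactly the inputs on which A returns normally: some set T of graph's keys contains the source
-- and is closed under positive-capacity edges, so the search only ever visits keys of graph;
-- otherwise a reachable vertex has no entry and A raises KeyError.
def Pre_find_reachable_projects_py (graph : List (Int × List (Int × Int))) (source : Int)
    (n : Int) : Prop :=
  ∃ T ∈ (graph.map Prod.fst).sublists,
    source ∈ T ∧ ∀ v ∈ T, ∀ pr ∈ graph, pr.1 = v → ∀ q ∈ pr.2, 0 < q.2 → q.1 ∈ T
instance (graph : List (Int × List (Int × Int))) (source : Int) (n : Int) :
    Decidable (Pre_find_reachable_projects_py graph source n) := by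
  unfold Pre_find_reachable_projects_py; infer_instance

def pvWitness_find_reachable_projects_py : (List (Int × List (Int × Int))) × Int × Int :=
  ([(0, [])], 0, 1)

def Spec_find_reachable_projects_py (graph : List (Int × List (Int × Int))) (source : Int) (n : Int) (out : List Int) : Prop := out = find_reachable_projects_py_alt graph source n
instance (graph : List (Int × List (Int × Int))) (source : Int) (n : Int) (out : List Int) : Decidable (Spec_find_reachable_projects_py graph source n out) := by unfold Spec_find_reachable_projects_py; infer_instance

-- ===== CLAIM (what is proved, stated in full; the proofs are below) =====
def Claim_equal_find_reachable_projects_py : Prop := ∀ (graph : List (Int × List (Int × Int))) (source : Int) (n : Int), Dom_find_reachable_projects_py graph source n → Pre_find_reachable_projects_py graph source n → Spec_find_reachable_projects_py graph source n (find_reachable_projects_py graph source n)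

-- ===== LEMMAS AND PROOFS =====

-- the vertices reachable from s along positive-capacity edges: the common characterisation
-- of both searches' final set
inductive pvReach (g : List (Int × List (Int × Int))) (s : Int) : Int → Prop
  | refl : pvReach g s s
  | tail {u v c : Int} : pvReach g s u → (v, c) ∈ pvAdj g u → 0 < c → pvReach g s v

-- ---- A's inner fold: elementary facts about pvStepA ----

lemma pv_mem_push_left (adj : List (Int × Int)) :
    ∀ (stk : List Int) (x : Int), x ∈ stk → x ∈ pvPush adj stk := by
  induction adj with
  | nil => exact fun stk x hx => hx
  | cons p tl ih =>
    intro stk x hx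
    rw [pvPush, List.foldl_cons]
    by_cases hp : (decide (0 < p.2)) = true
    · rw [if_pos hp]; exact ih (p.1 :: stk) x (List.mem_cons_of_mem p.1 hx)
    · rw [if_neg hp]; exact ih stk x hx

lemma pv_mem_push_pos (adj : List (Int × Int)) :
    ∀ (stk : List Int) (p : Int × Int), p ∈ adj → 0 < p.2 → p.1 ∈ pvPush adj stk := by
  induction adj with
  | nil => exact fun stk p hp => absurd hp (List.not_mem_nil)
  | cons q tl ih =>
    intro stk p hp hpos
    rw [pvPush, List.foldl_cons]
    rcases List.mem_cons.mp hp with h | h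
    · subst h
      rw [if_pos (decide_eq_true hpos)]
      exact pv_mem_push_left tl (p.1 :: stk) p.1 (List.mem_cons_self ..)
    · by_cases hq : (decide (0 < q.2)) = true
      · rw [if_pos hq]; exact ih (q.1 :: stk) p h hpos
      · rw [if_neg hq]; exact ih stk p h hpos


lemma pv_foldA_reach_mono (l : List (Int × Int)) :
    ∀ (st : PySem.Set Int × List Int) (x : Int), x ∈ st.1 → x ∈ (l.foldl pvStepA st).1 := by
  induction l with
  | nil => exact fun st x hx => hx
  | cons p tl ih =>
    intro st x hx
    rw [List.foldl_cons]
    by_cases hc : (!(PySem.Set.contains st.1 p.1) && decide (0 < p.2)) = true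
    · rw [pvStepA, if_pos hc]
      exact ih _ x (by rw [PySem.Set.mem_add]; exact Or.inl hx)
    · rw [pvStepA, if_neg hc]
      exact ih st x hx

lemma pv_foldA_queue_mono (l : List (Int × Int)) :
    ∀ (st : PySem.Set Int × List Int) (x : Int), x ∈ st.2 → x ∈ (l.foldl pvStepA st).2 := by
  induction l with
  | nil => exact fun st x hx => hx
  | cons p tl ih =>
    intro st x hx
    rw [List.foldl_cons]
    by_cases hc : (!(PySem.Set.contains st.1 p.1) && decide (0 < p.2)) = true
    · rw [pvStepA, if_pos hc]
      exact ih _ x (List.mem_append_left _ hx)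
    · rw [pvStepA, if_neg hc]
      exact ih st x hx

lemma pv_foldA_reach_src (l : List (Int × Int)) :
    ∀ (st : PySem.Set Int × List Int) (x : Int), x ∈ (l.foldl pvStepA st).1 →
      x ∈ st.1 ∨ ∃ c, (x, c) ∈ l ∧ 0 < c := by
  induction l with
  | nil => exact fun st x hx => Or.inl hx
  | cons p tl ih =>
    intro st x hx
    rw [List.foldl_cons] at hx
    by_cases hc : (!(PySem.Set.contains st.1 p.1) && decide (0 < p.2)) = true
    · rw [pvStepA, if_pos hc] at hx
      rcases ih _ x hx with h | ⟨c, hc1, hc2⟩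
      · rw [PySem.Set.mem_add] at h
        rcases h with h | h
        · exact Or.inl h
        · refine Or.inr ⟨p.2, ?_, of_decide_eq_true ((Bool.and_eq_true _ _).mp hc).2⟩
          rw [h]; exact List.mem_cons_self ..
      · exact Or.inr ⟨c, List.mem_cons_of_mem p hc1, hc2⟩
    · rw [pvStepA, if_neg hc] at hx
      rcases ih st x hx with h | ⟨c, hc1, hc2⟩
      · exact Or.inl h
      · exact Or.inr ⟨c, List.mem_cons_of_mem p hc1, hc2⟩

lemma pv_foldA_reach_or_queue (l : List (Int × Int)) :
    ∀ (st : PySem.Set Int × List Int) (x : Int), x ∈ (l.foldl pvStepA st).1 →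
      x ∈ st.1 ∨ x ∈ (l.foldl pvStepA st).2 := by
  induction l with
  | nil => exact fun st x hx => Or.inl hx
  | cons p tl ih =>
    intro st x hx
    rw [List.foldl_cons] at hx ⊢
    by_cases hc : (!(PySem.Set.contains st.1 p.1) && decide (0 < p.2)) = true
    · rw [pvStepA, if_pos hc] at hx ⊢
      rcases ih _ x hx with h | h
      · rw [PySem.Set.mem_add] at h
        rcases h with h | h
        · exact Or.inl h
        · refine Or.inr (pv_foldA_queue_mono tl _ x ?_)
          exact List.mem_append_right _ (by rw [h]; exact List.mem_singleton_self _)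
      · exact Or.inr h
    · rw [pvStepA, if_neg hc] at hx ⊢
      exact ih st x hx

lemma pv_foldA_queue_sub (l : List (Int × Int)) :
    ∀ (st : PySem.Set Int × List Int), (∀ x ∈ st.2, x ∈ st.1) →
      ∀ x ∈ (l.foldl pvStepA st).2, x ∈ (l.foldl pvStepA st).1 := by
  induction l with
  | nil => exact fun st h => h
  | cons p tl ih =>
    intro st hqr x hx
    rw [List.foldl_cons] at hx ⊢
    by_cases hc : (!(PySem.Set.contains st.1 p.1) && decide (0 < p.2)) = true
    · rw [pvStepA, if_pos hc] at hx ⊢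
      refine ih _ ?_ x hx
      intro y hy
      rcases List.mem_append.mp hy with h | h
      · rw [PySem.Set.mem_add]; exact Or.inl (hqr y h)
      · rw [PySem.Set.mem_add]; exact Or.inr (List.mem_singleton.mp h)
    · rw [pvStepA, if_neg hc] at hx ⊢
      exact ih st hqr x hx

lemma pv_foldA_adj_done (l : List (Int × Int)) :
    ∀ (st : PySem.Set Int × List Int) (p : Int × Int), p ∈ l → 0 < p.2 →
      p.1 ∈ (l.foldl pvStepA st).1 := by
  induction l with
  | nil => exact fun st p hp => absurd hp (List.not_mem_nil)
  | cons q tl ih =>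
    intro st p hp hpos
    rw [List.foldl_cons]
    rcases List.mem_cons.mp hp with h | h
    · subst h
      by_cases hc : (!(PySem.Set.contains st.1 p.1) && decide (0 < p.2)) = true
      · rw [pvStepA, if_pos hc]
        exact pv_foldA_reach_mono tl _ p.1 (by rw [PySem.Set.mem_add]; exact Or.inr rfl)
      · rw [pvStepA, if_neg hc]
        have hm : PySem.Set.contains st.1 p.1 = true := by
          cases hcb : PySem.Set.contains st.1 p.1
          · exact absurd (by rw [hcb, decide_eq_true hpos]; rfl) hc
          · rfl
        exact pv_foldA_reach_mono tl st p.1 ((PySem.Set.contains_iff _ _).mp hm)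
    · by_cases hc : (!(PySem.Set.contains st.1 q.1) && decide (0 < q.2)) = true
      · rw [pvStepA, if_pos hc]; exact ih _ p h hpos
      · rw [pvStepA, if_neg hc]; exact ih st p h hpos

lemma pv_foldA_nodup (l : List (Int × Int)) :
    ∀ (st : PySem.Set Int × List Int), st.1.Nodup → (l.foldl pvStepA st).1.Nodup := by
  induction l with
  | nil => exact fun st h => h
  | cons p tl ih =>
    intro st h
    rw [List.foldl_cons]
    by_cases hc : (!(PySem.Set.contains st.1 p.1) && decide (0 < p.2)) = true
    · rw [pvStepA, if_pos hc]; exact ih _ (PySem.Set.nodup_add _ _ h)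
    · rw [pvStepA, if_neg hc]; exact ih st h

-- ---- A's while loop: monotone / sound / closed / nodup ----

lemma pv_bfs_mono (graph : List (Int × List (Int × Int))) :
    ∀ (queue : List Int) (reach : PySem.Set Int) (x : Int),
      x ∈ reach → x ∈ bfsLoop graph queue reach := by
  intro queue reach
  induction queue, reach using bfsLoop.induct graph with
  | case1 reach =>
    intro x hx
    rw [bfsLoop]
    exact hx
  | case2 reach cur rest st ih =>
    intro x hx
    rw [bfsLoop]
    exact ih x (pv_foldA_reach_mono _ _ x hx)

lemma pv_bfs_nodup (graph : List (Int × List (Int × Int))) :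
    ∀ (queue : List Int) (reach : PySem.Set Int),
      reach.Nodup → (bfsLoop graph queue reach).Nodup := by
  intro queue reach
  induction queue, reach using bfsLoop.induct graph with
  | case1 reach =>
    intro h
    rw [bfsLoop]
    exact h
  | case2 reach cur rest st ih =>
    intro h
    rw [bfsLoop]
    exact ih (pv_foldA_nodup _ _ h)

lemma pv_bfs_sound (graph : List (Int × List (Int × Int))) (s : Int) :
    ∀ (queue : List Int) (reach : PySem.Set Int),
      (∀ x ∈ queue, x ∈ reach) → (∀ x ∈ reach, pvReach graph s x) →
      ∀ x ∈ bfsLoop graph queue reach, pvReach graph s x := by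
  intro queue reach
  induction queue, reach using bfsLoop.induct graph with
  | case1 reach =>
    intro _ hr x hx
    rw [bfsLoop] at hx
    exact hr x hx
  | case2 reach cur rest st ih =>
    intro hqr hr x hx
    rw [bfsLoop] at hx
    refine ih ?_ ?_ x hx
    · exact pv_foldA_queue_sub _ _ (fun y hy => hqr y (List.mem_cons_of_mem cur hy))
    · intro y hy
      rcases pv_foldA_reach_src _ _ y hy with h | ⟨c, hc1, hc2⟩
      · exact hr y h
      · exact pvReach.tail (hr cur (hqr cur (List.mem_cons_self ..))) hc1 hc2

lemma pv_bfs_closed (graph : List (Int × List (Int × Int))) :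
    ∀ (queue : List Int) (reach : PySem.Set Int),
      (∀ u ∈ reach, u ∉ queue → ∀ p ∈ pvAdj graph u, 0 < p.2 → p.1 ∈ reach) →
      ∀ u ∈ bfsLoop graph queue reach, ∀ p ∈ pvAdj graph u, 0 < p.2 →
        p.1 ∈ bfsLoop graph queue reach := by
  intro queue reach
  induction queue, reach using bfsLoop.induct graph with
  | case1 reach =>
    intro hP u hu p hp hpos
    rw [bfsLoop] at hu ⊢
    exact hP u hu (List.not_mem_nil) p hp hpos
  | case2 reach cur rest st ih =>
    intro hP u hu p hp hpos
    rw [bfsLoop] at hu ⊢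
    refine ih ?_ u hu p hp hpos
    intro w hw hwq q hq hqpos
    rcases pv_foldA_reach_or_queue _ _ w hw with hwr | hwq2
    · by_cases hwc : w = cur
      · subst hwc
        exact pv_foldA_adj_done _ _ q hq hqpos
      · have hwrest : w ∉ rest := fun h => hwq (pv_foldA_queue_mono _ _ w h)
        have : w ∉ cur :: rest := by
          intro h; rcases List.mem_cons.mp h with h | h
          · exact hwc h
          · exact hwrest h
        exact pv_foldA_reach_mono _ _ q.1 (hP w hwr this q hq hqpos)
    · exact absurd hwq2 hwq

lemma pv_bfs_mem (graph : List (Int × List (Int × Int))) (s : Int) (x : Int) :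
    x ∈ bfsLoop graph [s] (PySem.Set.add PySem.Set.empty s) ↔ pvReach graph s x := by
  constructor
  · refine pv_bfs_sound graph s [s] _ ?_ ?_ x
    · intro y hy
      rw [PySem.Set.mem_add]
      exact Or.inr (List.mem_singleton.mp hy)
    · intro y hy
      rw [PySem.Set.mem_add] at hy
      rcases hy with hy | hy
      · exact absurd hy (List.not_mem_nil)
      · rw [hy]; exact pvReach.refl
  · intro hr
    induction hr with
    | refl =>
      exact pv_bfs_mono graph [s] _ s (by rw [PySem.Set.mem_add]; exact Or.inr rfl)
    | tail hu hadj hpos ihu =>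
      refine pv_bfs_closed graph [s] _ ?_ _ ihu _ hadj hpos
      intro w hw hwq p hp hpos2
      rw [PySem.Set.mem_add] at hw
      rcases hw with hw | hw
      · exact absurd hw (List.not_mem_nil)
      · exact absurd (hw ▸ List.mem_singleton_self s) hwq

-- ---- B's while loop: monotone / stack-exhausted / sound / closed / nodup ----

lemma pv_dfs_mono (graph : List (Int × List (Int × Int))) :
    ∀ (stk : List Int) (reach : PySem.Set Int) (x : Int),
      x ∈ reach → x ∈ dfsLoop graph stk reach := by
  intro stk reach
  induction stk, reach using dfsLoop.induct graph with
  | case1 reach =>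
    intro x hx
    rw [dfsLoop]
    exact hx
  | case2 reach v rest hv ih =>
    intro x hx
    rw [dfsLoop, dif_pos hv]
    exact ih x hx
  | case3 reach v rest hv ih =>
    intro x hx
    rw [dfsLoop, dif_neg hv]
    exact ih x (by rw [PySem.Set.mem_add]; exact Or.inl hx)

lemma pv_dfs_nodup (graph : List (Int × List (Int × Int))) :
    ∀ (stk : List Int) (reach : PySem.Set Int),
      reach.Nodup → (dfsLoop graph stk reach).Nodup := by
  intro stk reach
  induction stk, reach using dfsLoop.induct graph with
  | case1 reach =>
    intro h
    rw [dfsLoop]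
    exact h
  | case2 reach v rest hv ih =>
    intro h
    rw [dfsLoop, dif_pos hv]
    exact ih h
  | case3 reach v rest hv ih =>
    intro h
    rw [dfsLoop, dif_neg hv]
    exact ih (PySem.Set.nodup_add _ _ h)

lemma pv_dfs_stack (graph : List (Int × List (Int × Int))) :
    ∀ (stk : List Int) (reach : PySem.Set Int) (x : Int),
      x ∈ stk → x ∈ dfsLoop graph stk reach := by
  intro stk reach
  induction stk, reach using dfsLoop.induct graph with
  | case1 reach =>
    exact fun x hx => absurd hx (List.not_mem_nil)
  | case2 reach v rest hv ih =>
    intro x hx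
    rw [dfsLoop, dif_pos hv]
    rcases List.mem_cons.mp hx with h | h
    · exact pv_dfs_mono graph rest reach x (h ▸ hv)
    · exact ih x h
  | case3 reach v rest hv ih =>
    intro x hx
    rw [dfsLoop, dif_neg hv]
    rcases List.mem_cons.mp hx with h | h
    · exact pv_dfs_mono graph _ _ x (by rw [PySem.Set.mem_add]; exact Or.inr h)
    · exact ih x (pv_mem_push_left _ rest x h)

lemma pv_dfs_sound (graph : List (Int × List (Int × Int))) (s : Int) :
    ∀ (stk : List Int) (reach : PySem.Set Int),
      (∀ x ∈ stk, pvReach graph s x) → (∀ x ∈ reach, pvReach graph s x) →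
      ∀ x ∈ dfsLoop graph stk reach, pvReach graph s x := by
  intro stk reach
  induction stk, reach using dfsLoop.induct graph with
  | case1 reach =>
    intro _ hr x hx
    rw [dfsLoop] at hx
    exact hr x hx
  | case2 reach v rest hv ih =>
    intro hs hr x hx
    rw [dfsLoop, dif_pos hv] at hx
    exact ih (fun y hy => hs y (List.mem_cons_of_mem v hy)) hr x hx
  | case3 reach v rest hv ih =>
    intro hs hr x hx
    rw [dfsLoop, dif_neg hv] at hx
    refine ih ?_ ?_ x hx
    · intro y hy
      rcases pv_push_mem _ rest y hy with h | ⟨c, hc1, hc2⟩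
      · exact hs y (List.mem_cons_of_mem v h)
      · exact pvReach.tail (hs v (List.mem_cons_self ..)) hc1 hc2
    · intro y hy
      rw [PySem.Set.mem_add] at hy
      rcases hy with hy | hy
      · exact hr y hy
      · exact hy ▸ hs v (List.mem_cons_self ..)

lemma pv_dfs_closed (graph : List (Int × List (Int × Int))) :
    ∀ (stk : List Int) (reach : PySem.Set Int),
      (∀ u ∈ reach, ∀ p ∈ pvAdj graph u, 0 < p.2 → p.1 ∈ reach ∨ p.1 ∈ stk) →
      ∀ u ∈ dfsLoop graph stk reach, ∀ p ∈ pvAdj graph u, 0 < p.2 →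
        p.1 ∈ dfsLoop graph stk reach := by
  intro stk reach
  induction stk, reach using dfsLoop.induct graph with
  | case1 reach =>
    intro hQ u hu p hp hpos
    rw [dfsLoop] at hu ⊢
    rcases hQ u hu p hp hpos with h | h
    · exact h
    · exact absurd h (List.not_mem_nil)
  | case2 reach v rest hv ih =>
    intro hQ u hu p hp hpos
    rw [dfsLoop, dif_pos hv] at hu ⊢
    refine ih ?_ u hu p hp hpos
    intro w hw q hq hqpos
    rcases hQ w hw q hq hqpos with h | h
    · exact Or.inl h
    · rcases List.mem_cons.mp h with h | h
      · exact Or.inl (h ▸ hv)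
      · exact Or.inr h
  | case3 reach v rest hv ih =>
    intro hQ u hu p hp hpos
    rw [dfsLoop, dif_neg hv] at hu ⊢
    refine ih ?_ u hu p hp hpos
    intro w hw q hq hqpos
    rw [PySem.Set.mem_add] at hw
    rcases hw with hw | hw
    · rcases hQ w hw q hq hqpos with h | h
      · exact Or.inl (by rw [PySem.Set.mem_add]; exact Or.inl h)
      · rcases List.mem_cons.mp h with h | h
        · exact Or.inl (by rw [PySem.Set.mem_add]; exact Or.inr h)
        · exact Or.inr (pv_mem_push_left _ rest q.1 h)
    · subst hw
      exact Or.inr (pv_mem_push_pos _ rest q hq hqpos)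

lemma pv_dfs_mem (graph : List (Int × List (Int × Int))) (s : Int) (x : Int) :
    x ∈ dfsLoop graph [s] PySem.Set.empty ↔ pvReach graph s x := by
  constructor
  · refine pv_dfs_sound graph s [s] _ ?_ ?_ x
    · intro y hy
      rw [List.mem_singleton.mp hy]
      exact pvReach.refl
    · exact fun y hy => absurd hy (List.not_mem_nil)
  · intro hr
    induction hr with
    | refl => exact pv_dfs_stack graph [s] _ s (List.mem_singleton_self s)
    | tail hu hadj hpos ihu =>
      refine pv_dfs_closed graph [s] _ ?_ _ ihu _ hadj hpos
      exact fun w hw => absurd hw (List.not_mem_nil)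

-- ===== VERDICT (by name: the statement is the Claim_ definition above) =====
theorem find_reachable_projects_py_spec : Claim_equal_find_reachable_projects_py := by
  unfold Claim_equal_find_reachable_projects_py
  intro graph source n _ _
  unfold Spec_find_reachable_projects_py
  unfold find_reachable_projects_py find_reachable_projects_py_alt
  simp only
  rw [PySem.List.foldl_append_if_eq_filter, List.nil_append]
  set FA := bfsLoop graph [source] (PySem.Set.add PySem.Set.empty source) with hFA
  set FD := dfsLoop graph [source] PySem.Set.empty with hFD
  have hnodA : FA.Nodup :=
    pv_bfs_nodup graph [source] _ (PySem.Set.nodup_add _ _ List.nodup_nil)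
  have hnodD : FD.Nodup := pv_dfs_nodup graph [source] _ List.nodup_nil
  have hperm : FA.Perm FD := (List.perm_ext_iff_of_nodup hnodA hnodD).mpr
    (fun x => (pv_bfs_mem graph source x).trans (pv_dfs_mem graph source x).symm)
  have hsp : (PySem.List.sorted FA (fun x => x) false).Perm FA :=
    PySem.List.sorted_perm FA (fun x => x) false
  have hle : (PySem.List.sorted FA (fun x => x) false).Pairwise (fun a b => a ≤ b) :=
    PySem.List.sorted_pairwise FA (fun x => x)
  have hnds : (PySem.List.sorted FA (fun x => x) false).Nodup := hsp.nodup_iff.mpr hnodA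
  have hlt : (PySem.List.sorted FA (fun x => x) false).Pairwise (fun a b => a < b) :=
    (hle.and hnds).imp (fun h => lt_of_le_of_ne h.1 h.2)
  exact (PySem.List.sorted_eq_of_perm_of_pairwise_lt _ _ (fun x => x)
    ((hsp.filter _).trans (hperm.filter _)) (hlt.filter _)).symm
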